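-- pv_equiv track=rewrite | github.com/chae-yoon/algorithm | 프로그래머스/lv0/120808. 분수의 덧셈/분수의 덧셈.py | solution
-- ===== SOURCE A (Python) =====
-- def solution(numer1, denom1, numer2, denom2):
--     denom = denom1 * denom2
--     numer = numer1 * denom2 + numer2 * denom1
--     x = 2
--
--     while x <= denom:
--         if denom % x == 0 and numer % x == 0:
--             denom //= x
--             numer //= x
--             x = 2
--         else:
--             x += 1
--
--     answer = [numer, denom]
--
--     return answer
-- ===== SOURCE B (Python) =====
-- def solution(numer1, denom1, numer2, denom2):
--     denom = denom1 * denom2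
--     numer = numer1 * denom2 + numer2 * denom1
--     a, b = abs(numer), abs(denom)
--     while b:
--         a, b = b, a % b
--     if a == 0:
--         return [numer, denom]
--     return [numer // a, denom // a]
-- ===== Notes on version B (the rewrite author's own statement) =====
-- stated objective: faster
-- what changed: replaces the restart-at-2 trial-division reduction loop with Euclid's gcd followed by a single exact division; Pre_ excludes the corners outside the exercise's positive-denominator guarantee (zero combined denominator, or negative combined denominator sharing a factor > 1 with the numerator) where A returns the sum unreduced and B returns it reduced — equally defensible representations of an unspecified corner
-- outside the precondition, e.g. on solution(1, 0, 1, 2): A returns [2, 0], B returns [1, 0]; on solution(2, -4, 0, 5): A returns [10, -20], B returns [1, -2]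
import Mathlib
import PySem

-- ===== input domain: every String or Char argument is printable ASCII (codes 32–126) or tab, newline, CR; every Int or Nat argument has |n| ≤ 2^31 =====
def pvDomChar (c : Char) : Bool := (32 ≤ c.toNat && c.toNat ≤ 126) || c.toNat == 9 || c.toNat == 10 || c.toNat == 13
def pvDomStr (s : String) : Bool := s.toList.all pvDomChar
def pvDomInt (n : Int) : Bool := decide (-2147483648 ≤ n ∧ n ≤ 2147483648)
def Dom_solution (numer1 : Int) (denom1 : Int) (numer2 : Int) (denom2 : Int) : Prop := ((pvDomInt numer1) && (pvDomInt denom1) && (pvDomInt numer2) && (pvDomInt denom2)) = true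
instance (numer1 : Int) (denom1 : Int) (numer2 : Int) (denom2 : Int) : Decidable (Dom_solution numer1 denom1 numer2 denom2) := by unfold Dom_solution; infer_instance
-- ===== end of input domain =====

-- B replaces A's restart-at-2 trial-division reduction loop by Euclid's gcd and one exact
-- division (objective: faster, asymptotically).


-- ===== PORT A =====
-- A's while loop: state (numer, denom, x); x starts at 2 and is reset to 2 after each division,
-- so 2 ≤ x is an invariant of every reachable state; it is carried as a proof argument solely
-- for the termination measure.
def loopA (numer denom x : Int) (hx : 2 ≤ x) : Int × Int :=
  if h : x ≤ denom then
    if PySem.Int.mod denom x = 0 ∧ PySem.Int.mod numer x = 0 then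
      loopA (PySem.Int.floordiv numer x) (PySem.Int.floordiv denom x) 2 (by omega)
    else
      loopA numer denom (x + 1) (by omega)
  else
    (numer, denom)
termination_by (denom.toNat, (denom + 1 - x).toNat)
decreasing_by
  · apply Prod.Lex.left
    have h1 : 0 < x := by omega
    have h2 : PySem.Int.floordiv denom x = denom / x := PySem.Int.floordiv_eq_ediv_of_pos h1
    have h3 : denom / x < denom := Int.ediv_lt_of_lt_mul h1 (by nlinarith)
    rw [h2]
    omega
  · apply Prod.Lex.right
    omega

def solution (numer1 : Int) (denom1 : Int) (numer2 : Int) (denom2 : Int) : List Int :=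
  let denom := denom1 * denom2
  let numer := numer1 * denom2 + numer2 * denom1
  let nd := loopA numer denom 2 (by omega)
  [nd.1, nd.2]

-- ===== PORT B =====
-- Euclid's algorithm of Source B: 'while b: a, b = b, a % b' on the absolute values.
def bgcd (a b : Nat) : Nat :=
  if b = 0 then a else bgcd b (a % b)
termination_by b
decreasing_by exact Nat.mod_lt _ (by omega)

def solution_alt (numer1 : Int) (denom1 : Int) (numer2 : Int) (denom2 : Int) : List Int :=
  let denom := denom1 * denom2
  let numer := numer1 * denom2 + numer2 * denom1
  let g : Int := (bgcd numer.natAbs denom.natAbs : Nat)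
  if g = 0 then [numer, denom]
  else [PySem.Int.floordiv numer g, PySem.Int.floordiv denom g]

-- ===== PRECONDITION & SPEC =====
-- Pre_ excludes only the corner cases outside the exercise's guarantee of positive denominators
-- on which the two answers are equally defensible representations: a zero combined denominator
-- (not a fraction at all) and a negative combined denominator sharing a factor > 1 with the
-- combined numerator, where A happens to return the sum unreduced and B returns it reduced to
-- lowest terms.
def Pre_solution (numer1 : Int) (denom1 : Int) (numer2 : Int) (denom2 : Int) : Prop :=
  0 < denom1 * denom2 ∨
    Int.gcd (numer1 * denom2 + numer2 * denom1) (denom1 * denom2) ≤ 1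
instance (numer1 : Int) (denom1 : Int) (numer2 : Int) (denom2 : Int) : Decidable (Pre_solution numer1 denom1 numer2 denom2) := by unfold Pre_solution; infer_instance

def pvWitness_solution : Int × Int × Int × Int := (1, 2, 3, 4)

def Spec_solution (numer1 : Int) (denom1 : Int) (numer2 : Int) (denom2 : Int) (out : List Int) : Prop := out = solution_alt numer1 denom1 numer2 denom2
instance (numer1 : Int) (denom1 : Int) (numer2 : Int) (denom2 : Int) (out : List Int) : Decidable (Spec_solution numer1 denom1 numer2 denom2 out) := by unfold Spec_solution; infer_instance

-- ===== CLAIM (what is proved, stated in full; the proofs are below) =====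
def Claim_equal_solution : Prop := ∀ (numer1 : Int) (denom1 : Int) (numer2 : Int) (denom2 : Int), Dom_solution numer1 denom1 numer2 denom2 → Pre_solution numer1 denom1 numer2 denom2 → Spec_solution numer1 denom1 numer2 denom2 (solution numer1 denom1 numer2 denom2)

-- ===== LEMMAS AND PROOFS =====

-- Source B's Euclid loop computes the gcd.
theorem bgcd_eq_gcd (a b : Nat) : bgcd a b = Nat.gcd a b := by
  induction a, b using bgcd.induct with
  | case1 a => simp [bgcd]
  | case2 a b h ih =>
      rw [bgcd, if_neg h, ih]
      rw [Nat.gcd_comm a b, Nat.gcd_rec b a, Nat.gcd_comm]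

theorem gcd_pos_of_denom_ne_zero (n d : Int) (hd : d ≠ 0) : 1 ≤ Int.gcd n d := by
  rcases Nat.eq_zero_or_pos (Int.gcd n d) with h0 | h1
  · exact absurd (Int.gcd_eq_zero_iff.mp h0).2 hd
  · exact h1

-- A's trial-division loop fully reduces the fraction when the denominator is positive:
-- if no candidate below x divides both components, the loop ends at (n/g, d/g), g = gcd n d.
theorem loopA_reduces (n d x : Int) (hx : 2 ≤ x) (hd : 1 ≤ d)
    (hco : ∀ y : Int, 2 ≤ y → y < x → ¬((y ∣ d) ∧ (y ∣ n))) :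
    loopA n d x hx = (n / (Int.gcd n d : Int), d / (Int.gcd n d : Int)) := by
  induction n, d, x, hx using loopA.induct with
  | case1 n d x hx h hdvd ih =>
      -- divide branch: x ∣ d and x ∣ n
      have hxpos : 0 < x := by omega
      have hdd : x ∣ d := (PySem.Int.mod_eq_zero_iff_dvd d x).mp hdvd.1
      have hdn : x ∣ n := (PySem.Int.mod_eq_zero_iff_dvd n x).mp hdvd.2
      obtain ⟨b, rfl⟩ := hdd
      obtain ⟨a, rfl⟩ := hdn
      have hfd : PySem.Int.floordiv (x * b) x = b := by
        rw [PySem.Int.floordiv_eq_ediv_of_pos hxpos, Int.mul_ediv_cancel_left _ (by omega)]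
      have hfn : PySem.Int.floordiv (x * a) x = a := by
        rw [PySem.Int.floordiv_eq_ediv_of_pos hxpos, Int.mul_ediv_cancel_left _ (by omega)]
      have hb1 : 1 ≤ b := by nlinarith
      rw [loopA, dif_pos h, if_pos hdvd]
      simp only [hfd, hfn]
      rw [hfd, hfn] at ih
      rw [ih hb1 (by intro y hy2 hylt; omega)]
      have hg : Int.gcd (x * a) (x * b) = x.natAbs * Int.gcd a b := Int.gcd_mul_left x a b
      have habs : |x| = x := abs_of_pos hxpos
      rw [hg]
      push_cast
      rw [habs, Int.mul_ediv_mul_of_pos a (Int.gcd a b : Int) hxpos,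
          Int.mul_ediv_mul_of_pos b (Int.gcd a b : Int) hxpos]
  | case2 n d x hx h hdvd ih =>
      rw [loopA, dif_pos h, if_neg hdvd]
      refine ih (by omega) ?_
      intro y hy2 hylt hboth
      rcases lt_or_eq_of_le (by omega : y ≤ x) with hlt | rfl
      · exact hco y hy2 hlt hboth
      · exact hdvd ⟨(PySem.Int.mod_eq_zero_iff_dvd d y).mpr hboth.1,
                    (PySem.Int.mod_eq_zero_iff_dvd n y).mpr hboth.2⟩
  | case3 n d x hx h =>
      -- x > d ≥ 1: every divisor ≥ 2 of d is ≤ d < x, so gcd n d = 1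
      have hg1 : Int.gcd n d = 1 := by
        by_contra hne
        have hge : 1 ≤ Int.gcd n d := gcd_pos_of_denom_ne_zero n d (by omega)
        have hge2 : 2 ≤ (Int.gcd n d : Int) := by omega
        have hdvdd : (Int.gcd n d : Int) ∣ d := Int.gcd_dvd_right n d
        have hled : (Int.gcd n d : Int) ≤ d := Int.le_of_dvd (by omega) hdvdd
        exact hco (Int.gcd n d : Int) hge2 (by omega) ⟨hdvdd, Int.gcd_dvd_left n d⟩
      rw [loopA, dif_neg h, hg1]
      simp

-- A's loop does nothing when the denominator is < 2 (the condition 2 ≤ d fails at once).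
theorem loopA_stuck (n d : Int) (hd : d < 2) : loopA n d 2 (by omega) = (n, d) := by
  rw [loopA, dif_neg (by omega)]

-- ===== VERDICT (by name: the statement is the Claim_ definition above) =====
theorem solution_spec : Claim_equal_solution := by
  intro numer1 denom1 numer2 denom2 _ hpre
  unfold Spec_solution solution solution_alt
  simp only []
  set d := denom1 * denom2 with hd
  set n := numer1 * denom2 + numer2 * denom1 with hn
  have hbg : (bgcd n.natAbs d.natAbs : Int) = (Int.gcd n d : Int) := by
    rw [bgcd_eq_gcd]; rfl
  by_cases hdp : 0 < d
  · -- positive denominator: A reduces by the gcd, B divides by the gcd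
    have hg1 : 1 ≤ Int.gcd n d := gcd_pos_of_denom_ne_zero n d (by omega)
    have hgp : (0:Int) < (Int.gcd n d : Int) := by exact_mod_cast hg1
    rw [loopA_reduces n d 2 (by omega) (by omega) (by intro y h2 hlt; omega)]
    rw [hbg, if_neg (by omega)]
    rw [PySem.Int.floordiv_eq_ediv_of_pos hgp, PySem.Int.floordiv_eq_ediv_of_pos hgp]
  · -- d < 2 here, so A's loop is the identity; Pre_ gives gcd n d ≤ 1
    have hg : Int.gcd n d ≤ 1 := by
      rcases hpre with h | h
      · exact absurd h hdp
      · exact h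
    rw [loopA_stuck n d (by omega)]
    rcases Nat.eq_zero_or_pos (Int.gcd n d) with h0 | h1
    · rw [hbg, h0]; simp
    · have hg1 : Int.gcd n d = 1 := by omega
      rw [hbg, hg1, if_neg (by norm_num)]
      norm_num [PySem.Int.floordiv_eq_ediv_of_pos (by norm_num : (0:Int) < 1)]
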